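-- pv_equiv track=rewrite | github.com/guillaumehuet/AdventOfCode | 2022/15_2/solve.py | firstStar
-- ===== SOURCE A (Python) =====
-- def firstStar(input):
--   row = 2000000
--   sensorRow = []
--   beaconsInRow = set()
--   for sensor in input:
--     sensorRange = abs(sensor[3] - sensor[1]) + abs(sensor[2] - sensor[0])
--     rowDelta = abs(row - sensor[1])
--     if sensor[3] == row:
--       beaconsInRow.add(sensor[2:])
--     if rowDelta <= sensorRange:
--       minX = sensor[0] - (sensorRange - rowDelta)
--       maxX = sensor[0] + (sensorRange - rowDelta)
--       sensorRow.append((minX, maxX))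
--   sensorRow.sort()
--   i = 0
--   while True:
--     if i + 2 > len(sensorRow):
--       break
--     if sensorRow[i][1] >= sensorRow[i + 1][0]:
--       minX = min(sensorRow[i][0], sensorRow[i + 1][0])
--       maxX = max(sensorRow[i][1], sensorRow[i + 1][1])
--       sensorRow[i:i + 2] = [(minX, maxX)]
--     else:
--       i += 1
--   result = 0
--   for s in sensorRow:
--     result += s[1] + 1 - s[0]
--   result -= len(beaconsInRow)
--   return result
-- ===== SOURCE B (Python) =====
-- def firstStar(input):
--   row = 2000000
--   intervals = []
--   beaconsInRow = set()
--   for sx, sy, bx, by in input: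
--     if by == row:
--       beaconsInRow.add((bx, by))
--     reach = abs(by - sy) + abs(bx - sx) - abs(row - sy)
--     if reach >= 0:
--       intervals.append((sx - reach, sx + reach))
--   total = 0
--   cur = None
--   for lo, hi in sorted(intervals):
--     if cur is None:
--       cur = (lo, hi)
--     elif lo <= cur[1]:
--       cur = (min(cur[0], lo), max(cur[1], hi))
--     else:
--       total += cur[1] + 1 - cur[0]
--       cur = (lo, hi)
--   if cur is not None:
--     total += cur[1] + 1 - cur[0]
--   return total - len(beaconsInRow)
-- ===== Notes on version B (the rewrite author's own statement) =====
-- stated objective: alternative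
-- what changed: A merges overlapping intervals by repeatedly splicing adjacent pairs of the sorted list in place and then sums the merged list in a second loop; B makes one linear pass over the sorted intervals with a single current-interval accumulator, adding each finished run's length on the fly, so no merged list is ever built.
import Mathlib
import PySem

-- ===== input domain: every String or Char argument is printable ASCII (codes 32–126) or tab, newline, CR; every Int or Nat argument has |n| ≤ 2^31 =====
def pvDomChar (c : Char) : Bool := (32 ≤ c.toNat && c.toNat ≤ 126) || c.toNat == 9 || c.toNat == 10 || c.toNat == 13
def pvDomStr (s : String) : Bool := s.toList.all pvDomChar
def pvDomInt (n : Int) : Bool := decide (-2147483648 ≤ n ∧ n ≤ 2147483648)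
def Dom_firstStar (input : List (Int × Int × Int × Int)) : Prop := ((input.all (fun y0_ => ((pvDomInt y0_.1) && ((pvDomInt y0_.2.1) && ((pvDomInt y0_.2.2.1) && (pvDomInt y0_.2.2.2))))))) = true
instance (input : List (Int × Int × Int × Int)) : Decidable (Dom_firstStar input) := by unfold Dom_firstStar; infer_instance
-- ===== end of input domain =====

-- B replaces A's in-place pairwise splicing merge of the sorted interval list by a single
-- linear accumulator sweep that never builds a merged list (alternative decomposition).

-- ===== PORT A =====
-- first pass of A: collect (minX, maxX) coverage intervals for the row and the set of beacons in the row
def firstStarStep (st : List (Int × Int) × PySem.Set (Int × Int)) (sensor : Int × Int × Int × Int) :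
    List (Int × Int) × PySem.Set (Int × Int) :=
  let row : Int := 2000000
  let sensorRange := |sensor.2.2.2 - sensor.2.1| + |sensor.2.2.1 - sensor.1|
  let rowDelta := |row - sensor.2.1|
  let beacons := if sensor.2.2.2 = row then PySem.Set.add st.2 (sensor.2.2.1, sensor.2.2.2) else st.2
  let sensorRow :=
    if rowDelta ≤ sensorRange then
      st.1 ++ [(sensor.1 - (sensorRange - rowDelta), sensor.1 + (sensorRange - rowDelta))]
    else st.1
  (sensorRow, beacons)

-- A's while loop: `sensorRow[i:i+2] = [(min, max)]` splice, else `i += 1`, until `i + 2 > len`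
def mergeLoopA (l : List (Int × Int)) (i : Nat) : List (Int × Int) :=
  if _h : l.length < i + 2 then l
  else
    let a := l.getD i (0, 0)
    let b := l.getD (i + 1) (0, 0)
    if a.2 ≥ b.1 then
      mergeLoopA (l.take i ++ (min a.1 b.1, max a.2 b.2) :: l.drop (i + 2)) i
    else mergeLoopA l (i + 1)
termination_by 2 * l.length - i
decreasing_by
  · simp only [List.length_append, List.length_take, List.length_drop, List.length_cons]
    omega
  · omega

def firstStar (input : List (Int × Int × Int × Int)) : Int :=
  let st := input.foldl firstStarStep ([], PySem.Set.empty)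
  let sensorRow := mergeLoopA (PySem.List.sorted2 st.1 (fun p => p.1) (fun p => p.2)) 0
  let result := sensorRow.foldl (fun r s => r + s.2 + 1 - s.1) 0
  result - (PySem.Set.len st.2 : Int)

-- ===== PORT B =====
-- B's first pass: same intervals and beacon set, via the signed reach of each sensor into the row
def altStep (st : List (Int × Int) × PySem.Set (Int × Int)) (s : Int × Int × Int × Int) :
    List (Int × Int) × PySem.Set (Int × Int) :=
  let row : Int := 2000000
  let beacons := if s.2.2.2 = row then PySem.Set.add st.2 (s.2.2.1, s.2.2.2) else st.2
  let reach := |s.2.2.2 - s.2.1| + |s.2.2.1 - s.1| - |row - s.2.1|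
  (if 0 ≤ reach then st.1 ++ [(s.1 - reach, s.1 + reach)] else st.1, beacons)

-- one step of B's sweep: state = (total so far, current open interval or none)
def sweepStep (st : Int × Option (Int × Int)) (p : Int × Int) : Int × Option (Int × Int) :=
  match st.2 with
  | none => (st.1, some p)
  | some c =>
      if p.1 ≤ c.2 then (st.1, some (min c.1 p.1, max c.2 p.2))
      else (st.1 + c.2 + 1 - c.1, some p)

-- B's `if cur is not None: total += cur[1] + 1 - cur[0]` finish
def sweepFin (st : Int × Option (Int × Int)) : Int :=
  match st.2 with
  | none => st.1
  | some c => st.1 + c.2 + 1 - c.1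

def firstStar_alt (input : List (Int × Int × Int × Int)) : Int :=
  let st := input.foldl altStep ([], PySem.Set.empty)
  let fin := (PySem.List.sorted2 st.1 (fun p => p.1) (fun p => p.2)).foldl sweepStep (0, none)
  sweepFin fin - (PySem.Set.len st.2 : Int)

-- ===== PRECONDITION & SPEC =====
def Spec_firstStar (input : List (Int × Int × Int × Int)) (out : Int) : Prop := out = firstStar_alt input
instance (input : List (Int × Int × Int × Int)) (out : Int) : Decidable (Spec_firstStar input out) := by unfold Spec_firstStar; infer_instance

-- ===== CLAIM (what is proved, stated in full; the proofs are below) =====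
def Claim_equal_firstStar : Prop := ∀ (input : List (Int × Int × Int × Int)), Dom_firstStar input → Spec_firstStar input (firstStar input)

-- ===== LEMMAS AND PROOFS =====

-- the two first passes produce the same pair
theorem step_eq : firstStarStep = altStep := by
  funext st s
  simp [firstStarStep, altStep, Int.sub_nonneg]

-- structural form of A's merge loop
def mergeAll : List (Int × Int) → List (Int × Int)
  | [] => []
  | [a] => [a]
  | a :: b :: t =>
      if a.2 ≥ b.1 then mergeAll ((min a.1 b.1, max a.2 b.2) :: t)
      else a :: mergeAll (b :: t)
termination_by l => l.length

def sumLen (l : List (Int × Int)) : Int := l.foldl (fun r s => r + s.2 + 1 - s.1) 0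

theorem sumLen_shift (l : List (Int × Int)) (acc : Int) :
    l.foldl (fun r s => r + s.2 + 1 - s.1) acc = acc + sumLen l := by
  induction l generalizing acc with
  | nil => simp [sumLen]
  | cons x t ih =>
      simp only [sumLen, List.foldl_cons]
      rw [ih, ih (0 + x.2 + 1 - x.1)]
      ring

-- A's splice loop at index p.length on p ++ rest never revisits p and rewrites rest as mergeAll does
theorem mergeLoopA_eq (rest : List (Int × Int)) (p : List (Int × Int)) :
    mergeLoopA (p ++ rest) p.length = p ++ mergeAll rest := by
  induction rest using mergeAll.induct generalizing p with
  | case1 =>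
      rw [mergeLoopA]
      simp [mergeAll]
  | case2 a =>
      rw [mergeLoopA]
      simp [mergeAll]
  | case3 a b t hab ih =>
      rw [mergeLoopA]
      have hlen : ¬ (p ++ a :: b :: t).length < p.length + 2 := by
        simp only [List.length_append, List.length_cons]; omega
      have ha : (p ++ a :: b :: t).getD p.length ((0 : Int), (0 : Int)) = a := by
        simp [List.getD]
      have hb : (p ++ a :: b :: t).getD (p.length + 1) ((0 : Int), (0 : Int)) = b := by
        simp [List.getD]
      simp only [hlen, dite_false, ha, hb, hab, if_true]
      have hsplice : (p ++ a :: b :: t).take p.length ++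
          ((min a.1 b.1, max a.2 b.2) :: (p ++ a :: b :: t).drop (p.length + 2))
          = p ++ (min a.1 b.1, max a.2 b.2) :: t := by
        rw [List.take_left, List.drop_length_add_append]
        rfl
      rw [hsplice, ih p, mergeAll]
      simp [hab]
  | case4 a b t hab ih =>
      rw [mergeLoopA]
      have hlen : ¬ (p ++ a :: b :: t).length < p.length + 2 := by
        simp only [List.length_append, List.length_cons]; omega
      have ha : (p ++ a :: b :: t).getD p.length ((0 : Int), (0 : Int)) = a := by
        simp [List.getD]
      have hb : (p ++ a :: b :: t).getD (p.length + 1) ((0 : Int), (0 : Int)) = b := by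
        simp [List.getD]
      simp only [hlen, dite_false, ha, hb, hab, if_false]
      have hre : p ++ a :: b :: t = (p ++ [a]) ++ b :: t := by simp
      have hi : p.length + 1 = (p ++ [a]).length := by simp
      rw [hre, hi, ih (p ++ [a]), mergeAll]
      simp [hab]

-- B's sweep with an open interval computes the same total as summing mergeAll
theorem sweep_some (l : List (Int × Int)) (c : Int × Int) (acc : Int) :
    sweepFin (l.foldl sweepStep (acc, some c)) = acc + sumLen (mergeAll (c :: l)) := by
  induction l generalizing c acc with
  | nil =>
      simp only [List.foldl_nil, sweepFin, mergeAll, sumLen, List.foldl_cons, List.foldl_nil]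
      ring
  | cons x t ih =>
      simp only [List.foldl_cons]
      by_cases h : x.1 ≤ c.2
      · have hstep : sweepStep (acc, some c) x = (acc, some (min c.1 x.1, max c.2 x.2)) := by
          simp [sweepStep, h]
        rw [hstep, ih]
        rw [show mergeAll (c :: x :: t) = mergeAll ((min c.1 x.1, max c.2 x.2) :: t) from by
          rw [mergeAll]; simp [h]]
      · have hstep : sweepStep (acc, some c) x = (acc + c.2 + 1 - c.1, some x) := by
          simp [sweepStep, h]
        rw [hstep, ih]
        rw [show mergeAll (c :: x :: t) = c :: mergeAll (x :: t) from by
          rw [mergeAll]; simp [h]]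
        simp only [sumLen, List.foldl_cons]
        rw [sumLen_shift (mergeAll (x :: t)) (0 + c.2 + 1 - c.1)]
        have hs : sumLen (mergeAll (x :: t)) =
            (mergeAll (x :: t)).foldl (fun r s => r + s.2 + 1 - s.1) 0 := rfl
        rw [← hs]
        ring

theorem sweep_none (l : List (Int × Int)) :
    sweepFin (l.foldl sweepStep (0, none)) = sumLen (mergeAll l) := by
  cases l with
  | nil => simp [sweepFin, mergeAll, sumLen]
  | cons c t =>
      have hstep : sweepStep ((0 : Int), (none : Option (Int × Int))) c = (0, some c) := by
        simp [sweepStep]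
      simp only [List.foldl_cons, hstep]
      rw [sweep_some]
      ring

-- ===== VERDICT (by name: the statement is the Claim_ definition above) =====
theorem firstStar_spec : Claim_equal_firstStar := by
  intro input _
  unfold Spec_firstStar firstStar firstStar_alt
  dsimp only
  rw [step_eq]
  have h := mergeLoopA_eq
      (PySem.List.sorted2 (input.foldl altStep ([], PySem.Set.empty)).1
        (fun p => p.1) (fun p => p.2)) []
  simp only [List.nil_append, List.length_nil] at h
  rw [h, sweep_none]
  rfl
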